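-- pv_equiv track=rewrite | github.com/Tsovinar1986/CodeSignalIntro | SortByHeight.py | solution
-- ===== SOURCE A (Python) =====
-- def solution(a):
--        b = 0
--        k = sorted([i for i in a if i != -1])
--        for j in range(len(a)):
--         if a[j] != -1:
--           a[j] = k[b]
--           b += 1
--        return a
-- ===== SOURCE B (Python) =====
-- def solution(a):
--     # Selection by repeated minimum extraction: no sort call at all.
--     # Walk the list once; at each non-(-1) slot, pull the minimum of the
--     # remaining values and remove it from the pool.  O(n^2).
--     vals = [v for v in a if v != -1]
--     out = []
--     for v in a:
--         if v == -1:
--             out.append(-1)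
--         else:
--             m = min(vals)
--             vals.remove(m)
--             out.append(m)
--     a[:] = out
--     return a
-- ===== Notes on version B (the rewrite author's own statement) =====
-- stated objective: alternative
-- what changed: Replaces sorting the extracted values and re-filling by counter with a sort-free selection scheme: a single walk that, at each non-(-1) slot, extracts the minimum of the remaining value pool (min + remove), i.e. selection sort by repeated min-extraction instead of a sorted() call.
import Mathlib
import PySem

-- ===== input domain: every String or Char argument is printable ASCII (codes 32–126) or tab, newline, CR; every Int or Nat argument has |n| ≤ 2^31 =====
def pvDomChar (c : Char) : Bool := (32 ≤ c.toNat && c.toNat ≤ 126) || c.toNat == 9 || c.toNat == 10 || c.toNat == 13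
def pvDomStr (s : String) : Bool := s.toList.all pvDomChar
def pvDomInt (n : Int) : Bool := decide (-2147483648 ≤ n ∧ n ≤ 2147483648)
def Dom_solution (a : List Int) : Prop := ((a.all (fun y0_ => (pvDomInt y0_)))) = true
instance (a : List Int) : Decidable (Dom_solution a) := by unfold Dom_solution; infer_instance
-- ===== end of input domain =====

-- B replaces A's sort-then-refill (sorted() + counter loop) by a sort-free selection scheme:
-- one walk that at each non-(-1) slot extracts the minimum of the remaining value pool.
-- Equivalence is about the RETURN value; both Pythons also mutate `a` in place to that same value.

-- ===== PORT A =====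
-- the for-loop over range(len(a)) with state (current list, counter b), as structural recursion on the index
def solutionGo (k : List Int) (cur : List Int) (b j : Nat) : List Int :=
  if h : j < cur.length then
    if PySem.List.pyGetD cur (j : Int) 0 ≠ -1 then
      solutionGo k (PySem.List.pySetD cur (j : Int) (PySem.List.pyGetD k (b : Int) 0)) (b + 1) (j + 1)
    else
      solutionGo k cur b (j + 1)
  else cur
termination_by cur.length - j
decreasing_by
  · simp [PySem.List.pySetD_natCast]; omega
  · omega

def solution (a : List Int) : List Int :=
  let k := PySem.List.sorted (a.filter (fun i => i ≠ -1)) id false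
  solutionGo k a 0 0

-- ===== PORT B =====
-- the for-loop over a with state (vals, out); Python's min raises on an empty pool, which is
-- unreachable here (the pool holds one value per remaining non-(-1) slot) — the `none` branch
-- is a totality guard only, and remove?.getD likewise (m is always in the pool).
def solution_alt (a : List Int) : List Int :=
  let vals := a.filter (fun v => v ≠ -1)
  (a.foldl (fun (s : List Int × List Int) (v : Int) =>
      if v = -1 then (s.1, s.2 ++ [(-1 : Int)])
      else
        match PySem.List.min? s.1 (fun x => x) with
        | some m => ((PySem.List.remove? s.1 m).getD s.1, s.2 ++ [m])
        | none => (s.1, s.2))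
    (vals, [])).2

-- ===== PRECONDITION & SPEC =====
def Spec_solution (a : List Int) (out : List Int) : Prop := out = solution_alt a
instance (a : List Int) (out : List Int) : Decidable (Spec_solution a out) := by unfold Spec_solution; infer_instance

-- ===== CLAIM (what is proved, stated in full; the proofs are below) =====
def Claim_equal_solution : Prop := ∀ (a : List Int), Dom_solution a → Spec_solution a (solution a)

-- ===== LEMMAS AND PROOFS =====

-- "fill xs consuming vs at the non-(-1) slots", the shape A's loop reduces to
def fillS (vs : List Int) : List Int → List Int
  | [] => []
  | x :: xs => if x ≠ -1 then vs.headD 0 :: fillS vs.tail xs else x :: fillS vs xs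

-- indexed variant matching A's counter b
def fillA (k : List Int) (b : Nat) : List Int → List Int
  | [] => []
  | x :: xs => if x ≠ -1 then PySem.List.pyGetD k (b : Int) 0 :: fillA k (b + 1) xs
               else x :: fillA k b xs

-- B's loop, output only: min-extraction fill
def selFill (vs : List Int) : List Int → List Int
  | [] => []
  | x :: xs =>
    if x = -1 then -1 :: selFill vs xs
    else
      match PySem.List.min? vs (fun y => y) with
      | some m => m :: selFill ((PySem.List.remove? vs m).getD vs) xs
      | none => selFill vs xs

theorem fillA_eq_fillS (k : List Int) : ∀ (a : List Int) (b : Nat), fillA k b a = fillS (k.drop b) a := by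
  intro a
  induction a with
  | nil => intro b; rfl
  | cons x xs ih =>
    intro b
    simp only [fillA, fillS, ih b, ih (b + 1)]
    by_cases hx : x = -1
    · simp [hx]
    · have h1 : (k.drop b).headD 0 = PySem.List.pyGetD k (b : Int) 0 := by
        simp [PySem.List.pyGetD_natCast, List.getD, ← List.head?_drop]
      have h2 : (k.drop b).tail = k.drop (b + 1) := by
        rw [List.tail_drop]
      simp [hx, ← h1, h2]

theorem solutionGo_eq (k : List Int) : ∀ (n : Nat) (cur : List Int) (b j : Nat),
    cur.length - j ≤ n → solutionGo k cur b j = cur.take j ++ fillA k b (cur.drop j) := by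
  intro n
  induction n with
  | zero =>
    intro cur b j h
    have hj : ¬ j < cur.length := by omega
    rw [solutionGo]
    simp only [hj, dif_neg, not_false_eq_true]
    rw [List.drop_eq_nil_of_le (by omega), List.take_of_length_le (by omega)]
    simp [fillA]
  | succ n ih =>
    intro cur b j h
    rw [solutionGo]
    by_cases hj : j < cur.length
    · have hdrop : cur.drop j = cur[j] :: cur.drop (j + 1) := by
        rw [List.drop_eq_getElem_cons hj]
      have hget : PySem.List.pyGetD cur (j : Int) 0 = cur[j] := by
        simp [PySem.List.pyGetD_natCast, List.getD, List.getElem?_eq_getElem hj]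
      by_cases hx : cur[j] = -1
      · simp only [hj, dif_pos, hget, hx, ne_eq, not_true_eq_false, if_false]
        rw [ih cur b (j + 1) (by omega), hdrop]
        simp [fillA, hx, List.take_add_one, List.getElem?_eq_getElem hj]
      · simp only [hj, dif_pos, hget, hx, ne_eq, not_false_eq_true, if_true]
        set v := PySem.List.pyGetD k (b : Int) 0 with hv
        have hset : PySem.List.pySetD cur (j : Int) v = cur.set j v := by
          simp [PySem.List.pySetD_natCast]
        rw [hset, ih (cur.set j v) (b + 1) (j + 1) (by simp; omega)]
        have htake : (cur.set j v).take (j + 1) = cur.take j ++ [v] := by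
          rw [List.set_eq_take_append_cons_drop, if_pos hj, List.take_append]
          simp [List.length_take, Nat.min_eq_left (by omega : j ≤ cur.length)]
        have hdrop2 : (cur.set j v).drop (j + 1) = cur.drop (j + 1) := by
          rw [List.set_eq_take_append_cons_drop, if_pos hj, List.drop_append]
          simp [List.length_take, Nat.min_eq_left (by omega : j ≤ cur.length)]
        rw [htake, hdrop2, hdrop]
        simp [fillA, hx, hv, PySem.List.pyGetD_natCast, List.getD]
    · simp only [hj, dif_neg, not_false_eq_true]
      rw [List.drop_eq_nil_of_le (by omega), List.take_of_length_le (by omega)]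
      simp [fillA]

theorem solution_eq_fillS (a : List Int) :
    solution a = fillS (PySem.List.sorted (a.filter (fun i => i ≠ -1)) id false) a := by
  rw [solution, solutionGo_eq _ a.length a 0 0 (by omega)]
  simp [fillA_eq_fillS]

-- extracting the minimum of a nonempty pool = taking the head of its sorted order
theorem min_extract (vs : List Int) (hvs : vs ≠ []) :
    ∃ m t, PySem.List.min? vs (fun y => y) = some m ∧
      PySem.List.sorted vs id false = m :: t ∧
      PySem.List.sorted (vs.erase m) id false = t ∧ m ∈ vs := by
  obtain ⟨m, hm⟩ : ∃ m, PySem.List.min? vs (fun y => y) = some m := by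
    cases h : PySem.List.min? vs (fun y => y) with
    | none => exact absurd ((PySem.List.min?_eq_none_iff vs (fun y => y)).mp h) hvs
    | some m => exact ⟨m, rfl⟩
  have hmem := PySem.List.min?_mem hm
  have hmin := PySem.List.min?_isMin hm
  obtain ⟨m', t, hst⟩ : ∃ m' t, PySem.List.sorted vs id false = m' :: t := by
    cases h : PySem.List.sorted vs id false with
    | nil => exact absurd ((PySem.List.sorted_eq_nil_iff vs id false).mp h) hvs
    | cons m' t => exact ⟨m', t, rfl⟩
  have hperm : (m' :: t).Perm vs := hst ▸ PySem.List.sorted_perm vs id false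
  have hm'mem : m' ∈ vs := hperm.mem_iff.mp (by simp)
  have hm'le : ∀ y ∈ vs, m' ≤ y := by
    intro y hy
    exact PySem.List.key_head_sorted_le vs id hst y hy
  have heq : m = m' := le_antisymm (hmin m' hm'mem) (hm'le m hmem)
  subst heq
  refine ⟨m, t, hm, hst, ?_, hmem⟩
  have hpw : (m :: t).Pairwise (fun a b => (a : Int) ≤ b) := by
    have := PySem.List.sorted_pairwise vs (id : Int → Int)
    rw [hst] at this
    exact this
  exact PySem.List.sorted_id_eq_of_perm_of_pairwise (vs.erase m) t
    ((List.cons_perm_iff_perm_erase.mp hperm).2) (List.Pairwise.of_cons hpw)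

theorem sel_eq_fill : ∀ (l vs : List Int),
    l.countP (fun x => decide (x ≠ -1)) ≤ vs.length →
    selFill vs l = fillS (PySem.List.sorted vs id false) l := by
  intro l
  induction l with
  | nil => intro vs _; rfl
  | cons x xs ih =>
    intro vs hc
    rw [List.countP_cons] at hc
    by_cases hx : x = -1
    · have hc' : xs.countP (fun x => decide (x ≠ -1)) ≤ vs.length := by simpa [hx] using hc
      simp only [selFill, fillS, hx]
      simp [ih vs hc']
    · have hvs : vs ≠ [] := by
        intro h; subst h
        simp [hx] at hc
      obtain ⟨m, t, hmin, hsort, herase, hmem⟩ := min_extract vs hvs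
      have hrem : (PySem.List.remove? vs m).getD vs = vs.erase m := by
        rw [PySem.List.remove?_eq_some_erase vs m hmem]; rfl
      simp only [selFill, fillS, hx, hmin, hsort, hrem, ne_eq, not_false_eq_true,
        if_true, decide_true] at hc ⊢
      rw [ih (vs.erase m) (by rw [List.length_erase_of_mem hmem]; simp only [ne_eq] at hc ⊢; omega), herase]
      simp

-- B's fold, tracked by selFill
theorem foldl_sel : ∀ (l vs out : List Int),
    (l.foldl (fun (s : List Int × List Int) (v : Int) =>
        if v = -1 then (s.1, s.2 ++ [(-1 : Int)])
        else
          match PySem.List.min? s.1 (fun x => x) with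
          | some m => ((PySem.List.remove? s.1 m).getD s.1, s.2 ++ [m])
          | none => (s.1, s.2)) (vs, out)).2 = out ++ selFill vs l := by
  intro l
  induction l with
  | nil => intro vs out; simp [selFill]
  | cons x xs ih =>
    intro vs out
    by_cases hx : x = -1
    · subst hx
      simp only [List.foldl_cons, selFill, ih]
      simp
    · simp only [List.foldl_cons, selFill, if_neg hx]
      cases h : PySem.List.min? vs (fun x => x) with
      | none => simp [ih]
      | some m => simp [ih]

theorem main_eq (a : List Int) : solution a = solution_alt a := by
  rw [solution_eq_fillS]
  unfold solution_alt
  rw [foldl_sel, List.nil_append,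
    sel_eq_fill a (a.filter (fun v => v ≠ -1)) (by simp [List.countP_eq_length_filter])]

-- ===== VERDICT (by name: the statement is the Claim_ definition above) =====
theorem solution_spec : Claim_equal_solution := by
  unfold Claim_equal_solution
  intro a _
  unfold Spec_solution
  exact main_eq a
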